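-- pv_equiv track=rewrite | github.com/SamZhu19921116/cjzhu3_nlu | RULE_ENGINE.py | KeyWordMatcherReverse
-- ===== SOURCE A (Python) =====
-- def KeyWordMatcherReverse(human_str,regex_str):
--     regex_res = []
--     regex_tmp = []
--     keyword_hit_list = []
--     keyword_hitchar_len = 0
--     for regex_char in iter(regex_str):
--         if regex_char == "(" or regex_char == ")" or regex_char == "|" or regex_char == "&":
--             if len(regex_tmp) > 0:
--                 if "".join(regex_tmp) in human_str:
--                     regex_res.append("True")
--                     keyword_hitchar_len += len(regex_tmp)
--                     keyword_hit_list.append("".join(regex_tmp))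
--                 else:
--                     regex_res.append("False")
--                 regex_tmp.clear()
--             regex_res.append(regex_char)
--         else:
--             regex_tmp.append(regex_char)
--
--     if len(regex_tmp) > 0:
--         if "".join(regex_tmp) in human_str:
--             regex_res.append("True")
--             keyword_hitchar_len += len(regex_tmp)
--             keyword_hit_list.append("".join(regex_tmp))
--         else:
--             regex_res.append("False")
--     return "".join(regex_res),set(keyword_hit_list),keyword_hitchar_len
-- ===== SOURCE B (Python) =====
-- import re
--
-- def KeyWordMatcherReverse(human_str, regex_str):
--     # Tokenize once: keyword pieces and single-char delimiters, alternating.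
--     out = []
--     hits = []
--     total = 0
--     for tok in re.split(r'([()|&])', regex_str):
--         if tok in ('(', ')', '|', '&'):
--             out.append(tok)
--         elif tok:
--             if tok in human_str:
--                 out.append("True")
--                 hits.append(tok)
--                 total += len(tok)
--             else:
--                 out.append("False")
--     return "".join(out), set(hits), total
-- ===== Notes on version B (the rewrite author's own statement) =====
-- stated objective: simpler
-- what changed: Tokenize the expression once with re.split on a capturing delimiter class and loop over whole tokens, replacing A's char-by-char buffer loop with a duplicated flush block.
import Mathlib
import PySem

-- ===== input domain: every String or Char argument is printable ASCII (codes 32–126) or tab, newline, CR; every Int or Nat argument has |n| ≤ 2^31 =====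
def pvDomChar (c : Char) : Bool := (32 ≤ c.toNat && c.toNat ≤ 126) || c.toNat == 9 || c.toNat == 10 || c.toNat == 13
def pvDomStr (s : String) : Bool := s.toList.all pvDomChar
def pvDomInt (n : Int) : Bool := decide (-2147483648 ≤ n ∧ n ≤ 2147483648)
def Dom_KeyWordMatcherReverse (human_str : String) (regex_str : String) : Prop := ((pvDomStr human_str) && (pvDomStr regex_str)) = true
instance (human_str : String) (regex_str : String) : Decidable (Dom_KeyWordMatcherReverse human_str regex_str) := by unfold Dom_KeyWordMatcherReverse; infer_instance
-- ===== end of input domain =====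

-- B tokenizes the expression once (re.split with a capturing delimiter class) and processes whole
-- keyword tokens, instead of A's char-by-char buffer loop; objective: simpler decomposition, same cost.

-- ===== PORT A =====
-- A-side helper: the flush of regex_tmp (the Python writes this block twice — inside the loop and after it).
-- State: (regex_res, regex_tmp, keyword_hit_list, keyword_hitchar_len).
def pvFlushA (human : List Char) (st : List String × List Char × List String × Int) :
    List String × List Char × List String × Int :=
  if st.2.1.length > 0 then
    if PySem.Chars.isIn st.2.1 human then
      (st.1 ++ ["True"], [], st.2.2.1 ++ [String.ofList st.2.1], st.2.2.2 + (st.2.1.length : Int))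
    else (st.1 ++ ["False"], [], st.2.2.1, st.2.2.2)
  else st

def pvStepA (human : List Char) (st : List String × List Char × List String × Int) (c : Char) :
    List String × List Char × List String × Int :=
  if c = '(' ∨ c = ')' ∨ c = '|' ∨ c = '&' then
    let f := pvFlushA human st
    (f.1 ++ [String.ofList [c]], f.2.1, f.2.2.1, f.2.2.2)
  else (st.1, st.2.1 ++ [c], st.2.2.1, st.2.2.2)

def KeyWordMatcherReverse (human_str : String) (regex_str : String) : String × List String × Int :=
  let st := regex_str.toList.foldl (pvStepA human_str.toList) ([], [], [], 0)
  let f := pvFlushA human_str.toList st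
  (PySem.Str.join "" f.1, PySem.Set.ofList f.2.2.1, f.2.2.2)

-- ===== PORT B =====
-- B-side helpers: hand port of re.split(r'([()|&])', s) — alternating keyword pieces and
-- single-char delimiters, empty pieces included (exact for this pattern).
def pvIsDelim (c : Char) : Bool := c == '(' || c == ')' || c == '|' || c == '&'

def pvSplitTok : List Char → List Char → List String
  | [], acc => [String.ofList acc]
  | c :: cs, acc =>
    if pvIsDelim c then String.ofList acc :: String.ofList [c] :: pvSplitTok cs []
    else pvSplitTok cs (acc ++ [c])

-- one token step of B's loop; state (out, hits, total)
def pvProcTok (human_str : String) (st : List String × List String × Int) (tok : String) :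
    List String × List String × Int :=
  if tok = "(" ∨ tok = ")" ∨ tok = "|" ∨ tok = "&" then (st.1 ++ [tok], st.2.1, st.2.2)
  else if tok ≠ "" then
    if PySem.Str.isIn tok human_str then
      (st.1 ++ ["True"], st.2.1 ++ [tok], st.2.2 + (PySem.Str.len tok : Int))
    else (st.1 ++ ["False"], st.2.1, st.2.2)
  else st

def KeyWordMatcherReverse_alt (human_str : String) (regex_str : String) : String × List String × Int :=
  let st := (pvSplitTok regex_str.toList []).foldl (pvProcTok human_str) ([], [], 0)
  (PySem.Str.join "" st.1, PySem.Set.ofList st.2.1, st.2.2)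

-- ===== PRECONDITION & SPEC =====
def Spec_KeyWordMatcherReverse (human_str : String) (regex_str : String) (out : String × List String × Int) : Prop := out = KeyWordMatcherReverse_alt human_str regex_str
instance (human_str : String) (regex_str : String) (out : String × List String × Int) : Decidable (Spec_KeyWordMatcherReverse human_str regex_str out) := by unfold Spec_KeyWordMatcherReverse; infer_instance

-- ===== CLAIM (what is proved, stated in full; the proofs are below) =====
def Claim_equal_KeyWordMatcherReverse : Prop := ∀ (human_str : String) (regex_str : String), Dom_KeyWordMatcherReverse human_str regex_str → Spec_KeyWordMatcherReverse human_str regex_str (KeyWordMatcherReverse human_str regex_str)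

-- ===== LEMMAS AND PROOFS =====

lemma pvIsDelim_iff (c : Char) : pvIsDelim c = true ↔ (c = '(' ∨ c = ')' ∨ c = '|' ∨ c = '&') := by
  simp [pvIsDelim, or_assoc]

lemma pvOfList_eq (acc : List Char) (s : String) : String.ofList acc = s ↔ acc = s.toList := by
  constructor
  · intro h; have := congrArg String.toList h; simpa using this
  · rintro rfl; simp

-- flushing a delimiter-free buffer acc agrees with B processing the single token String.ofList acc
lemma pvFlush_proc (human_str : String) (acc : List Char) (res hits : List String) (len : Int)
    (h : ∀ c ∈ acc, pvIsDelim c = false) :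
    pvFlushA human_str.toList (res, acc, hits, len)
      = ((pvProcTok human_str (res, hits, len) (String.ofList acc)).1, [],
         (pvProcTok human_str (res, hits, len) (String.ofList acc)).2.1,
         (pvProcTok human_str (res, hits, len) (String.ofList acc)).2.2) := by
  by_cases hnil : acc = []
  · subst hnil; simp [pvFlushA, pvProcTok]
  · have hne : String.ofList acc ≠ "" := by
      simpa [pvOfList_eq] using hnil
    have hnd : ¬ (String.ofList acc = "(" ∨ String.ofList acc = ")" ∨
        String.ofList acc = "|" ∨ String.ofList acc = "&") := by
      rintro (h1 | h1 | h1 | h1) <;> rw [pvOfList_eq] at h1 <;> subst h1 <;>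
        simp [pvIsDelim] at h
    have hlen : 0 < acc.length := by
      cases acc with
      | nil => exact absurd rfl hnil
      | cons a l => simp
    by_cases hin : PySem.Chars.isIn acc human_str.toList = true
    · simp [pvFlushA, pvProcTok, hnd, hne, hlen, hin]
    · simp [pvFlushA, pvProcTok, hnd, hne, hlen, hin]

-- main invariant: A's remaining char loop + final flush = B's loop over the remaining tokens
lemma pvMain (human_str : String) (cs : List Char) :
    ∀ (acc : List Char) (res hits : List String) (len : Int),
    (∀ c ∈ acc, pvIsDelim c = false) →
    pvFlushA human_str.toList (cs.foldl (pvStepA human_str.toList) (res, acc, hits, len))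
      = (((pvSplitTok cs acc).foldl (pvProcTok human_str) (res, hits, len)).1, [],
         ((pvSplitTok cs acc).foldl (pvProcTok human_str) (res, hits, len)).2.1,
         ((pvSplitTok cs acc).foldl (pvProcTok human_str) (res, hits, len)).2.2) := by
  induction cs with
  | nil =>
    intro acc res hits len h
    simpa [pvSplitTok] using pvFlush_proc human_str acc res hits len h
  | cons c cs ih =>
    intro acc res hits len h
    by_cases hc : c = '(' ∨ c = ')' ∨ c = '|' ∨ c = '&'
    · have hd : pvIsDelim c = true := (pvIsDelim_iff c).2 hc
      have hstep : pvStepA human_str.toList (res, acc, hits, len) c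
          = ((pvProcTok human_str (res, hits, len) (String.ofList acc)).1 ++ [String.ofList [c]], [],
             (pvProcTok human_str (res, hits, len) (String.ofList acc)).2.1,
             (pvProcTok human_str (res, hits, len) (String.ofList acc)).2.2) := by
        simp only [pvStepA, if_pos hc, pvFlush_proc human_str acc res hits len h]
      have htokc : pvProcTok human_str (pvProcTok human_str (res, hits, len) (String.ofList acc)) (String.ofList [c])
          = ((pvProcTok human_str (res, hits, len) (String.ofList acc)).1 ++ [String.ofList [c]],
             (pvProcTok human_str (res, hits, len) (String.ofList acc)).2.1,
             (pvProcTok human_str (res, hits, len) (String.ofList acc)).2.2) := by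
        have : String.ofList [c] = "(" ∨ String.ofList [c] = ")" ∨
            String.ofList [c] = "|" ∨ String.ofList [c] = "&" := by
          rcases hc with rfl | rfl | rfl | rfl
          · exact Or.inl rfl
          · exact Or.inr (Or.inl rfl)
          · exact Or.inr (Or.inr (Or.inl rfl))
          · exact Or.inr (Or.inr (Or.inr rfl))
        simp [pvProcTok, this]
      simp only [List.foldl_cons, pvSplitTok, hd, if_true, hstep, htokc]
      exact ih [] _ _ _ (by simp)
    · have hd : pvIsDelim c = false := by
        cases hb : pvIsDelim c with
        | false => rfl
        | true => exact absurd ((pvIsDelim_iff c).1 hb) hc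
      have hstep : pvStepA human_str.toList (res, acc, hits, len) c
          = (res, acc ++ [c], hits, len) := by
        simp [pvStepA, hc]
      simp only [List.foldl_cons, pvSplitTok, hd, Bool.false_eq_true, if_false, hstep]
      exact ih (acc ++ [c]) res hits len (by
        intro x hx
        rcases List.mem_append.1 hx with hx | hx
        · exact h x hx
        · simp at hx; subst hx; exact hd)

-- ===== VERDICT (by name: the statement is the Claim_ definition above) =====
theorem KeyWordMatcherReverse_spec : Claim_equal_KeyWordMatcherReverse := by
  intro human_str regex_str _
  unfold Spec_KeyWordMatcherReverse KeyWordMatcherReverse KeyWordMatcherReverse_alt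
  simp only [pvMain human_str regex_str.toList [] [] [] 0 (by simp)]
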